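-- pv_equiv track=rewrite | github.com/cpellerito1/Grep-Utility | grepy.py | compute
-- ===== SOURCE A (Python) =====
-- def compute(accept_states, transitions, input_str):
--     # compute on NFA
--     # set current state to initial state
--     current_state = "q0"
--     # loop[ through the input string for each character]
--     for t in input_str:
--         fail = 0  # initialize fail check
--         # loop through the list of transitions, if the current state =
--         # to the in_state of a transition, check if the value of that
--         # transition = to t. If it is set current state to to_state
--         for trans in transitions:
--             if trans[0] == current_state:
--                 if trans[2] == t:
--                     current_state = trans[1]
--             else:
--                 fail += 1
--                 # if you gop through the whole list of transitions and
--                 # none have the same in_state and value, return False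
--                 if fail == len(transitions):
--                     return False
--     # if you go through the entire string and the current state
--     # is in the list of accepting states return True, otherwise false
--     if current_state in accept_states:
--         return True
--
--     else:
--         return False
-- ===== SOURCE B (Python) =====
-- def compute(accept_states, transitions, input_str):
--     # Index the ordered transition list by symbol once, and precompute the set
--     # of states with an outgoing transition; per character only the ordered
--     # bucket of that character is folded (list order, hence chaining, is
--     # preserved: transitions with another symbol never fire during that char).
--     by_sym = {}
--     for src, dst, sym in transitions:
--         by_sym.setdefault(sym, []).append((src, dst))
--     live = {src for src, _, _ in transitions}
--     state = "q0"
--     for t in input_str: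
--         if transitions and state not in live:
--             return False
--         for src, dst in by_sym.get(t, []):
--             if src == state:
--                 state = dst
--     return state in accept_states
-- ===== Notes on version B (the rewrite author's own statement) =====
-- stated objective: alternative
-- what changed: Replaces A's per-character scan of the whole transition list (with a fail counter) by a one-time hash index of the transitions grouped by symbol plus a precomputed set of live source states: per character only the ordered bucket of that character is folded and the stuck test is one set lookup.
import Mathlib
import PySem

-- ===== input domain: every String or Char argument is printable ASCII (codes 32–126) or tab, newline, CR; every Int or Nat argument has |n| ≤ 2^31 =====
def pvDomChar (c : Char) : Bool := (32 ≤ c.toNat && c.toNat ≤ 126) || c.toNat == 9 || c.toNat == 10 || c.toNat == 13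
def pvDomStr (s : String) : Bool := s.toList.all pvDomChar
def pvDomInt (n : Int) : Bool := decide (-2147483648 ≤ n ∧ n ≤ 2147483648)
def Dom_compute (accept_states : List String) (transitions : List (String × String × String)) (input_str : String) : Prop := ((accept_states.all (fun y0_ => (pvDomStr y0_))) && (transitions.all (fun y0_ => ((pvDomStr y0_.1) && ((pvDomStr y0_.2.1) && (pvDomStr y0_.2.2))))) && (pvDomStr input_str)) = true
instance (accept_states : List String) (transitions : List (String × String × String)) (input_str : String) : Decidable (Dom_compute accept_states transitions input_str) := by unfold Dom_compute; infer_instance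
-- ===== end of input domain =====

-- B indexes the transitions by symbol once (a dict of ordered buckets) and precomputes
-- the set of live source states; per character it folds only that character's bucket
-- (an alternative decomposition; same measured cost as A).

-- ===== PORT A =====
-- inner scan over transitions: state + fail counter; none = early `return False`
def computeInner (t : Char) (total : Nat) :
    List (String × String × String) → String → Nat → Option String
  | [], st, _ => some st
  | tr :: rest, st, fail =>
      if tr.1 == st then
        computeInner t total rest (if tr.2.2 == String.ofList [t] then tr.2.1 else st) fail
      else
        if fail + 1 == total then none
        else computeInner t total rest st (fail + 1)

def computeLoop (accept_states : List String) (transitions : List (String × String × String)) :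
    List Char → String → Bool
  | [], st => st ∈ accept_states
  | t :: rest, st =>
      match computeInner t transitions.length transitions st 0 with
      | none => false
      | some st' => computeLoop accept_states transitions rest st'

def compute (accept_states : List String) (transitions : List (String × String × String)) (input_str : String) : Bool :=
  computeLoop accept_states transitions input_str.toList "q0"

-- ===== PORT B =====
-- `by_sym.setdefault(sym, []).append((src, dst))` = Dict.modify sym [] (· ++ [(src, dst)])
def altIndex (transitions : List (String × String × String)) :
    PySem.Dict String (List (String × String)) :=
  transitions.foldl (fun d tr => d.modify tr.2.2 [] (· ++ [(tr.1, tr.2.1)])) PySem.Dict.empty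

-- one character: fold the ordered bucket of that character (`if src == state: state = dst`)
def altBucketStep (bucket : List (String × String)) (st : String) : String :=
  bucket.foldl (fun s p => if p.1 == s then p.2 else s) st

def altLoop (accept_states : List String) (transitions : List (String × String × String))
    (bySym : PySem.Dict String (List (String × String))) (live : PySem.Set String) :
    List Char → String → Bool
  | [], st => st ∈ accept_states
  | t :: rest, st =>
      -- `if transitions and state not in live: return False`
      if !transitions.isEmpty && !(PySem.Set.contains live st) then false
      else altLoop accept_states transitions bySym live rest
             (altBucketStep (bySym.getD (String.ofList [t]) []) st)

def compute_alt (accept_states : List String) (transitions : List (String × String × String)) (input_str : String) : Bool :=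
  altLoop accept_states transitions (altIndex transitions)
    (PySem.Set.ofList (transitions.map (·.1))) input_str.toList "q0"

-- ===== PRECONDITION & SPEC =====
def Spec_compute (accept_states : List String) (transitions : List (String × String × String)) (input_str : String) (out : Bool) : Prop := out = compute_alt accept_states transitions input_str
instance (accept_states : List String) (transitions : List (String × String × String)) (input_str : String) (out : Bool) : Decidable (Spec_compute accept_states transitions input_str out) := by unfold Spec_compute; infer_instance

-- ===== CLAIM (what is proved, stated in full; the proofs are below) =====
def Claim_equal_compute : Prop := ∀ (accept_states : List String) (transitions : List (String × String × String)) (input_str : String), Dom_compute accept_states transitions input_str → Spec_compute accept_states transitions input_str (compute accept_states transitions input_str)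

-- ===== LEMMAS AND PROOFS =====

-- once some transition has matched, fail can no longer reach `total`
theorem inner_lt (t : Char) (total : Nat) :
    ∀ (trs : List (String × String × String)) (st : String) (fail : Nat),
      fail + trs.length < total →
      computeInner t total trs st fail =
        some (trs.foldl
          (fun s tr => if tr.1 == s then (if tr.2.2 == String.ofList [t] then tr.2.1 else s) else s)
          st) := by
  intro trs
  induction trs with
  | nil => intro st fail _; simp [computeInner]
  | cons tr rest ih =>
      intro st fail h
      simp only [List.length_cons] at h
      rw [List.foldl_cons, computeInner]
      by_cases hm : tr.1 == st
      · rw [if_pos hm, if_pos hm, ih _ _ (by omega)]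
      · rw [if_neg hm, if_neg hm, if_neg (by simp; omega), ih _ _ (by omega)]

-- tight case (no prior match): stuck ⇔ no transition leaves st
theorem inner_eq (t : Char) (total : Nat) :
    ∀ (trs : List (String × String × String)) (st : String) (fail : Nat),
      trs ≠ [] → fail + trs.length = total →
      computeInner t total trs st fail =
        (if trs.any (fun tr => tr.1 == st) then
          some (trs.foldl
            (fun s tr => if tr.1 == s then (if tr.2.2 == String.ofList [t] then tr.2.1 else s) else s)
            st)
        else none) := by
  intro trs
  induction trs with
  | nil => intro _ _ h; exact absurd rfl h
  | cons tr rest ih =>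
      intro st fail _ h
      simp only [List.length_cons] at h
      rw [computeInner]
      by_cases hm : tr.1 == st
      · rw [if_pos hm, inner_lt t total rest _ fail (by omega)]
        have hany : (tr :: rest).any (fun tr => tr.1 == st) = true := by
          simp [List.any_cons, hm]
        rw [if_pos hany, List.foldl_cons, if_pos hm]
      · rw [if_neg hm]
        have hany : (tr :: rest).any (fun tr => tr.1 == st) = rest.any (fun tr => tr.1 == st) := by
          simp [List.any_cons, hm]
        cases rest with
        | nil =>
            have ht : fail + 1 = total := by simpa using h
            simp [ht, hany]
        | cons tr2 rest2 =>
            have hne : ¬ (fail + 1 == total) = true := by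
              simp only [List.length_cons] at h; simp; omega
            rw [if_neg hne, ih _ _ (by simp) (by simp only [List.length_cons] at h ⊢; omega),
              hany]
            simp only [beq_iff_eq] at hm
            simp [hm]

-- the chained fold over the whole list equals the fold over the bucket of symbol c:
-- a transition with another symbol can never change the state
theorem chain_eq_bucket (c : String) :
    ∀ (trs : List (String × String × String)) (st : String),
      trs.foldl (fun s tr => if tr.1 == s then (if tr.2.2 == c then tr.2.1 else s) else s) st =
        altBucketStep ((trs.filter (fun tr => tr.2.2 == c)).map (fun tr => (tr.1, tr.2.1))) st := by
  intro trs
  induction trs with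
  | nil => intro st; rfl
  | cons tr rest ih =>
      intro st
      rw [List.foldl_cons, List.filter_cons]
      by_cases hs : tr.2.2 == c
      · simp only [hs, if_true, List.map_cons, altBucketStep, List.foldl_cons]
        exact ih _
      · simp only [hs, Bool.false_eq_true, if_false, ite_self]
        exact ih st

-- the bucket the index stores under c is exactly the filtered, projected transition list
theorem index_getD (transitions : List (String × String × String)) (c : String) :
    (altIndex transitions).getD c [] =
      (transitions.filter (fun tr => tr.2.2 == c)).map (fun tr => (tr.1, tr.2.1)) := by
  have h := PySem.Dict.getD_foldl_modify_append
    (l := transitions.map (fun tr => (tr.2.2, (tr.1, tr.2.1))))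
    (d := (PySem.Dict.empty : PySem.Dict String (List (String × String)))) (c := c)
  simp only [List.foldl_map] at h
  unfold altIndex
  rw [h]
  simp [List.filter_map, List.map_map, Function.comp_def]

-- the stuck tests agree: some transition leaves st ⇔ st is a live source state
theorem live_eq (transitions : List (String × String × String)) (st : String) :
    transitions.any (fun tr => tr.1 == st) =
      PySem.Set.contains (PySem.Set.ofList (transitions.map (·.1))) st := by
  simp only [PySem.Set.contains_eq_listContains]
  by_cases h : st ∈ transitions.map (·.1)
  · have : transitions.any (fun tr => tr.1 == st) = true := by
      rcases List.mem_map.mp h with ⟨tr, htr, he⟩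
      exact List.any_eq_true.mpr ⟨tr, htr, by simp [he]⟩
    simp [this, PySem.Set.mem_ofList, h]
  · have : transitions.any (fun tr => tr.1 == st) = false := by
      simp only [List.any_eq_false]
      intro tr htr
      simpa using fun he => h (List.mem_map.mpr ⟨tr, htr, he⟩)
    simp [this, PySem.Set.mem_ofList, h]

theorem loop_eq (accept_states : List String) (transitions : List (String × String × String)) :
    ∀ (cs : List Char) (st : String),
      computeLoop accept_states transitions cs st =
        altLoop accept_states transitions (altIndex transitions)
          (PySem.Set.ofList (transitions.map (·.1))) cs st := by
  intro cs
  induction cs with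
  | nil => intro st; rfl
  | cons t rest ih =>
      intro st
      simp only [computeLoop, altLoop]
      rw [index_getD transitions (String.ofList [t]), ← chain_eq_bucket]
      cases htr : transitions with
      | nil => subst htr; simp [computeInner, ih]
      | cons tr rest2 =>
          rw [← htr]
          have hne : transitions ≠ [] := by simp [htr]
          rw [inner_eq t transitions.length transitions st 0 hne (by omega)]
          by_cases hA : transitions.any (fun tr => tr.1 == st) = true
          · have hc : PySem.Set.contains (PySem.Set.ofList (transitions.map (·.1))) st = true := by
              rw [← live_eq]; exact hA
            rw [if_pos hA]
            simp only [hc, Bool.not_true, Bool.and_false, Bool.false_eq_true, if_false]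
            exact ih _
          · have hA' : (transitions.any fun tr => tr.1 == st) = false := Bool.eq_false_iff.mpr hA
            have hc : PySem.Set.contains (PySem.Set.ofList (transitions.map (·.1))) st = false := by
              rw [← live_eq]; exact hA'
            have hE : transitions.isEmpty = false := by simp [htr]
            rw [if_neg hA]
            show false = _
            rw [hc, hE]
            rfl

-- ===== VERDICT (by name: the statement is the Claim_ definition above) =====
theorem compute_spec : Claim_equal_compute := by
  intro accept_states transitions input_str _
  unfold Spec_compute compute compute_alt
  exact loop_eq accept_states transitions input_str.toList "q0"
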